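-- pv_equiv track=rewrite | github.com/agam-lang/agam | benchmarks/benchmarks/02_numerical_computation/comparisons/matrix_multiply.py | matrix_checksum
-- ===== SOURCE A (Python) =====
-- def matrix_checksum(size: int) -> int:
--     total = 0
--     for row in range(size):
--         for col in range(size):
--             cell = 0
--             for inner in range(size):
--                 cell += ((row * inner) + 3) * ((inner * col) + 5)
--             total += cell % 104729
--     return total
-- ===== SOURCE B (Python) =====
-- def matrix_checksum(size: int) -> int:
--     # Closed-form inner sum: sum_i (row*col*i^2 + (5*row+3*col)*i + 15) over i in range(size)
--     s1 = size * (size - 1) // 2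
--     s2 = (size - 1) * size * (2 * size - 1) // 6
--     total = 0
--     for row in range(size):
--         for col in range(size):
--             total += (row * col * s2 + (5 * row + 3 * col) * s1 + 15 * size) % 104729
--     return total
-- ===== Notes on version B (the rewrite author's own statement) =====
-- stated objective: faster
-- what changed: The innermost O(n) loop is replaced by the closed-form quadratic sum using the Gauss formulas for sum of i and i^2, so B is O(n^2) instead of O(n^3).
import Mathlib
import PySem

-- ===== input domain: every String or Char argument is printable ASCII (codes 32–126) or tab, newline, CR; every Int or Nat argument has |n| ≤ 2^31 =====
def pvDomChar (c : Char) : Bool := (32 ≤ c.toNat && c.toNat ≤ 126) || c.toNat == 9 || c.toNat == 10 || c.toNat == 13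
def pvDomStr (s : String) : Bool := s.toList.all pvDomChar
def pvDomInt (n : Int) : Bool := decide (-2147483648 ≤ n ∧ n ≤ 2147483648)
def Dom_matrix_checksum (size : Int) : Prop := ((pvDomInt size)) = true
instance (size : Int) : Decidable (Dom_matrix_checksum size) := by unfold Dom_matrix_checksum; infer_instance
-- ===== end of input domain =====

-- B replaces A's innermost loop by the closed-form quadratic sum (Gauss formulas), O(n^2) instead of O(n^3).

-- ===== PORT A =====
def matrix_checksum (size : Int) : Int :=
  (PySem.List.pyRange 0 size 1).foldl (fun total row =>
    (PySem.List.pyRange 0 size 1).foldl (fun total col =>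
      total + PySem.Int.mod
        ((PySem.List.pyRange 0 size 1).foldl
          (fun cell inner => cell + ((row * inner) + 3) * ((inner * col) + 5)) 0)
        104729) total) 0

-- ===== PORT B =====
def matrix_checksum_alt (size : Int) : Int :=
  let s1 := PySem.Int.floordiv (size * (size - 1)) 2
  let s2 := PySem.Int.floordiv ((size - 1) * size * (2 * size - 1)) 6
  (PySem.List.pyRange 0 size 1).foldl (fun total row =>
    (PySem.List.pyRange 0 size 1).foldl (fun total col =>
      total + PySem.Int.mod
        (row * col * s2 + (5 * row + 3 * col) * s1 + 15 * size) 104729) total) 0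

-- ===== PRECONDITION & SPEC =====
def Spec_matrix_checksum (size : Int) (out : Int) : Prop := out = matrix_checksum_alt size
instance (size : Int) (out : Int) : Decidable (Spec_matrix_checksum size out) := by unfold Spec_matrix_checksum; infer_instance

-- ===== CLAIM (what is proved, stated in full; the proofs are below) =====
def Claim_equal_matrix_checksum : Prop := ∀ (size : Int), Dom_matrix_checksum size → Spec_matrix_checksum size (matrix_checksum size)

-- ===== LEMMAS AND PROOFS =====

-- exact division through floordiv
theorem pv_fd_exact (a b : Int) (hb : 0 < b) (h : b ∣ a) : b * PySem.Int.floordiv a b = a := by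
  rw [PySem.Int.floordiv_eq_ediv_of_pos hb]
  exact Int.mul_ediv_cancel' h

theorem pv_dvd2 (n : Int) : (2 : Int) ∣ n * (n - 1) := by
  have h := Int.even_mul_succ_self (n - 1)
  rw [sub_add_cancel] at h
  have := h.two_dvd
  rwa [mul_comm] at this

theorem pv_dvd6 (m : Nat) : (6 : Int) ∣ ((m : Int) - 1) * (m : Int) * (2 * (m : Int) - 1) := by
  induction m with
  | zero => norm_num
  | succ k ih =>
    have e : ((↑(k+1) : Int) - 1) * ↑(k+1) * (2 * ↑(k+1) - 1)
        = ((k : Int) - 1) * k * (2 * k - 1) + 6 * ((k : Int) ^ 2) := by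
      push_cast; ring
    rw [e]
    exact dvd_add ih ⟨(k : Int) ^ 2, rfl⟩

theorem pv_f1_rec (k : Nat) :
    PySem.Int.floordiv (((k : Int) + 1) * (((k : Int) + 1) - 1)) 2
      = PySem.Int.floordiv ((k : Int) * ((k : Int) - 1)) 2 + k := by
  have e1 := pv_fd_exact (((k : Int) + 1) * (((k : Int) + 1) - 1)) 2 (by norm_num) (pv_dvd2 _)
  have e2 := pv_fd_exact ((k : Int) * ((k : Int) - 1)) 2 (by norm_num) (pv_dvd2 _)
  have key : (((k : Int) + 1) * (((k : Int) + 1) - 1)) = (k : Int) * ((k : Int) - 1) + 2 * k := by ring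
  linarith [e1, e2]

theorem pv_f2_rec (k : Nat) :
    PySem.Int.floordiv ((((k : Int) + 1) - 1) * ((k : Int) + 1) * (2 * ((k : Int) + 1) - 1)) 6
      = PySem.Int.floordiv (((k : Int) - 1) * (k : Int) * (2 * (k : Int) - 1)) 6 + (k : Int) * k := by
  have e1 := pv_fd_exact ((((k : Int) + 1) - 1) * ((k : Int) + 1) * (2 * ((k : Int) + 1) - 1)) 6
    (by norm_num) (by have := pv_dvd6 (k + 1); push_cast at this ⊢; exact this)
  have e2 := pv_fd_exact (((k : Int) - 1) * (k : Int) * (2 * (k : Int) - 1)) 6 (by norm_num) (pv_dvd6 k)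
  have key : ((((k : Int) + 1) - 1) * ((k : Int) + 1) * (2 * ((k : Int) + 1) - 1))
      = ((k : Int) - 1) * (k : Int) * (2 * (k : Int) - 1) + 6 * ((k : Int) * k) := by ring
  linarith [e1, e2]

-- the innermost loop of A equals B's closed form, for size = ↑m
theorem pv_cell (m : Nat) (row col : Int) :
    (PySem.List.pyRange 0 (m : Int) 1).foldl
        (fun cell inner => cell + ((row * inner) + 3) * ((inner * col) + 5)) 0
      = row * col * PySem.Int.floordiv (((m : Int) - 1) * (m : Int) * (2 * (m : Int) - 1)) 6
        + (5 * row + 3 * col) * PySem.Int.floordiv ((m : Int) * ((m : Int) - 1)) 2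
        + 15 * (m : Int) := by
  induction m with
  | zero =>
    rw [PySem.List.pyRange_one_eq_nil (by norm_num)]
    norm_num [PySem.Int.floordiv]
  | succ k ih =>
    have hsplit : PySem.List.pyRange 0 ((k : Int) + 1) 1
        = PySem.List.pyRange 0 (k : Int) 1 ++ [(k : Int)] :=
      PySem.List.pyRange_one_succ_right (by positivity)
    push_cast
    rw [hsplit, List.foldl_append, ih, pv_f1_rec k, pv_f2_rec k]
    simp only [List.foldl_cons, List.foldl_nil]
    ring

-- ===== VERDICT (by name: the statement is the Claim_ definition above) =====
theorem matrix_checksum_spec : Claim_equal_matrix_checksum := by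
  intro size _
  unfold Spec_matrix_checksum matrix_checksum matrix_checksum_alt
  rcases le_or_gt size 0 with h | h
  · rw [PySem.List.pyRange_one_eq_nil h]
    simp
  · obtain ⟨m, rfl⟩ : ∃ m : Nat, size = (m : Int) :=
      ⟨size.toNat, (Int.toNat_of_nonneg (le_of_lt h)).symm⟩
    simp only []
    apply PySem.List.foldl_congr_mem
    intro acc row _
    apply PySem.List.foldl_congr_mem
    intro acc2 col _
    rw [pv_cell m row col]
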